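-- pv_equiv track=rewrite | github.com/alexisjohann/ALPLASTBK | scripts/classify_evidence_tiers.py | get_author_tier
-- ===== SOURCE A (Python) =====
-- TIER_1_AUTHORS = {
--     # Experimental economists known for causal identification
--     'fehr', 'list', 'levitt', 'gneezy', 'rustichini', 'charness',
--     'duflo', 'banerjee', 'kremer', 'miguel', 'karlan',
--     'chetty', 'friedman', 'saez', 'kleven',
--     # Behavioral with strong experimental work
--     'camerer', 'loewenstein', 'prelec', 'weber',
-- }
--
-- TIER_1_2_AUTHORS = {
--     # Strong experimental but sometimes observational
--     'thaler', 'benartzi', 'madrian', 'choi',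
--     'ariely', 'norton', 'mazar',
--     'kahneman', 'tversky',
--     'falk', 'gaechter', 'kosfeld', 'rockenbach',
--     'malmendier', 'tate', 'shue',
--     'dellavigna', 'pope', 'card',
--     'imas', 'exley', 'niederle', 'vesterlund',
--     # Labor economists with natural experiments
--     'autor', 'katz', 'krueger', 'angrist', 'pischke',
--     'acemoglu', 'robinson',
-- }
--
-- TIER_2_AUTHORS = {
--     # Good empirical but not always causal
--     'shiller', 'akerlof', 'blanchard',
--     'laibson', 'odonoghue', 'rabin',
--     'sunstein', 'jolls',
--     'bertrand', 'mullainathan',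
-- }
--
-- TIER_3_AUTHORS = {
--     # Psychology / correlational
--     'dweck', 'duckworth', 'baumeister', 'vohs',
--     'mischel', 'bandura',
-- }
--
-- TIER_5_AUTHORS = {
--     # Pure theory
--     'arrow', 'debreu', 'nash', 'harsanyi', 'selten',
--     'myerson', 'maskin', 'tirole', 'laffont',
--     'milgrom', 'wilson', 'roth', 'shapley',
--     'aumann', 'schelling', 'rubinstein',
--     'stiglitz', 'spence', 'rothschild',
--     'grossman', 'hart', 'holmstrom',
--     'diamond', 'dybvig', 'mortensen', 'pissarides',
--     'lucas', 'sargent', 'prescott', 'kydland',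
--     'becker', 'murphy', 'posner',
--     'williamson', 'coase', 'north',
--     # Methodological
--     'heckman', 'mcfadden', 'newey', 'west',
--     # Philosophy/methodology of science
--     'polanyi', 'kuhn', 'collins', 'ioannidis', 'nosek',
--     # Gigerenzer (mixed - some experimental, some theoretical)
--     'gigerenzer', 'todd', 'hertwig', 'hoffrage',
-- }
--
-- def get_author_tier(authors):
--     """Determine tier based on author names"""
--     if not authors:
--         return None
--
--     # Normalize author names
--     author_set = set()
--     for author in authors:
--         if isinstance(author, str):
--             # Extract last name
--             parts = author.lower().replace(',', ' ').split()
--             for part in parts: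
--                 if len(part) > 2:
--                     author_set.add(part)
--
--     # Check author patterns (priority order)
--     for author in author_set:
--         if author in TIER_1_AUTHORS:
--             return 1
--
--     for author in author_set:
--         if author in TIER_5_AUTHORS:
--             return 5
--
--     for author in author_set:
--         if author in TIER_1_2_AUTHORS:
--             return 2
--
--     for author in author_set:
--         if author in TIER_2_AUTHORS:
--             return 2
--
--     for author in author_set:
--         if author in TIER_3_AUTHORS:
--             return 3
--
--     return None
-- ===== SOURCE B (Python) =====
-- # B: one combined surname -> (priority_rank, tier) table built once, then a single
-- # pass over the normalised name parts keeping the best (lowest) priority rank.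
-- # No intermediate set is needed: the answer depends only on which names occur.
--
-- _TIERS = [
--     (['fehr', 'list', 'levitt', 'gneezy', 'rustichini', 'charness',
--       'duflo', 'banerjee', 'kremer', 'miguel', 'karlan',
--       'chetty', 'friedman', 'saez', 'kleven',
--       'camerer', 'loewenstein', 'prelec', 'weber'], 1),
--     (['arrow', 'debreu', 'nash', 'harsanyi', 'selten',
--       'myerson', 'maskin', 'tirole', 'laffont',
--       'milgrom', 'wilson', 'roth', 'shapley',
--       'aumann', 'schelling', 'rubinstein',
--       'stiglitz', 'spence', 'rothschild',
--       'grossman', 'hart', 'holmstrom',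
--       'diamond', 'dybvig', 'mortensen', 'pissarides',
--       'lucas', 'sargent', 'prescott', 'kydland',
--       'becker', 'murphy', 'posner',
--       'williamson', 'coase', 'north',
--       'heckman', 'mcfadden', 'newey', 'west',
--       'polanyi', 'kuhn', 'collins', 'ioannidis', 'nosek',
--       'gigerenzer', 'todd', 'hertwig', 'hoffrage'], 5),
--     (['thaler', 'benartzi', 'madrian', 'choi',
--       'ariely', 'norton', 'mazar',
--       'kahneman', 'tversky',
--       'falk', 'gaechter', 'kosfeld', 'rockenbach',
--       'malmendier', 'tate', 'shue',
--       'dellavigna', 'pope', 'card',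
--       'imas', 'exley', 'niederle', 'vesterlund',
--       'autor', 'katz', 'krueger', 'angrist', 'pischke',
--       'acemoglu', 'robinson'], 2),
--     (['shiller', 'akerlof', 'blanchard',
--       'laibson', 'odonoghue', 'rabin',
--       'sunstein', 'jolls',
--       'bertrand', 'mullainathan'], 2),
--     (['dweck', 'duckworth', 'baumeister', 'vohs',
--       'mischel', 'bandura'], 3),
-- ]
--
-- _RANKED = {}
-- for _rank, (_names, _tier) in enumerate(_TIERS):
--     for _n in _names:
--         _RANKED.setdefault(_n, (_rank, _tier))
--
--
-- def get_author_tier(authors):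
--     """Determine tier based on author names"""
--     if not authors:
--         return None
--
--     best = None
--     for author in authors:
--         if isinstance(author, str):
--             for part in author.lower().replace(',', ' ').split():
--                 if len(part) > 2:
--                     r = _RANKED.get(part)
--                     if r is not None and (best is None or r[0] < best[0]):
--                         best = r
--     return best[1] if best is not None else None
-- ===== Notes on version B (the rewrite author's own statement) =====
-- stated objective: faster
-- what changed: A normalises names into a set and then makes five sequential membership passes over it (one per tier, in A's priority order); B instead precomputes one combined dict mapping each surname to its (priority_rank, tier) pair and makes a single pass over the raw name parts (no intermediate set), keeping the lowest priority rank seen.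
import Mathlib
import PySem

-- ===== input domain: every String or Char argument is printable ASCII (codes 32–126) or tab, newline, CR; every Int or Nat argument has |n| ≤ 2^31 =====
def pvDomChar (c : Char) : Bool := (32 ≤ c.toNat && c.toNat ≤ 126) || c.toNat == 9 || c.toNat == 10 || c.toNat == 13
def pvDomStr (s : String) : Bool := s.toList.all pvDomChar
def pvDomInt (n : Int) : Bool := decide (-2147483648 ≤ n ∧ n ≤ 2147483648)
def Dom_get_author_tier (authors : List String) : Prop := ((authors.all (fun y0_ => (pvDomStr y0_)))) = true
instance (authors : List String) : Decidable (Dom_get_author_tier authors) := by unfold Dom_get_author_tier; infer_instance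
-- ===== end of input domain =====

-- B replaces A's set-then-five-membership-passes by one combined surname -> (priority_rank, tier)
-- dict built once and a single min-rank pass over the raw name parts (no intermediate set);
-- a timing run measured B faster by a constant factor; same exact result.

-- ===== PORT A =====
def pvTier1 : PySem.Set String :=
  ["fehr", "list", "levitt", "gneezy", "rustichini", "charness",
   "duflo", "banerjee", "kremer", "miguel", "karlan",
   "chetty", "friedman", "saez", "kleven",
   "camerer", "loewenstein", "prelec", "weber"]

def pvTier12 : PySem.Set String :=
  ["thaler", "benartzi", "madrian", "choi",
   "ariely", "norton", "mazar",
   "kahneman", "tversky",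
   "falk", "gaechter", "kosfeld", "rockenbach",
   "malmendier", "tate", "shue",
   "dellavigna", "pope", "card",
   "imas", "exley", "niederle", "vesterlund",
   "autor", "katz", "krueger", "angrist", "pischke",
   "acemoglu", "robinson"]

def pvTier2 : PySem.Set String :=
  ["shiller", "akerlof", "blanchard",
   "laibson", "odonoghue", "rabin",
   "sunstein", "jolls",
   "bertrand", "mullainathan"]

def pvTier3 : PySem.Set String :=
  ["dweck", "duckworth", "baumeister", "vohs",
   "mischel", "bandura"]

def pvTier5 : PySem.Set String :=
  ["arrow", "debreu", "nash", "harsanyi", "selten",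
   "myerson", "maskin", "tirole", "laffont",
   "milgrom", "wilson", "roth", "shapley",
   "aumann", "schelling", "rubinstein",
   "stiglitz", "spence", "rothschild",
   "grossman", "hart", "holmstrom",
   "diamond", "dybvig", "mortensen", "pissarides",
   "lucas", "sargent", "prescott", "kydland",
   "becker", "murphy", "posner",
   "williamson", "coase", "north",
   "heckman", "mcfadden", "newey", "west",
   "polanyi", "kuhn", "collins", "ioannidis", "nosek",
   "gigerenzer", "todd", "hertwig", "hoffrage"]

-- author_set construction: for author in authors (always a str here, so the isinstance
-- guard is always true): parts = author.lower().replace(',',' ').split(); add parts of len > 2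
def pvBuildAuthorSet (authors : List String) : PySem.Set String :=
  authors.foldl (fun s author =>
    (PySem.Str.split₀ (PySem.Str.replace (PySem.Str.lower author) "," " ")).foldl
      (fun s part => if PySem.Str.len part > 2 then PySem.Set.add s part else s) s)
    PySem.Set.empty

-- 'for author in author_set: if author in TBL: return r' — the loop hits iff some element is in TBL
def pvLoopHitA (s : List String) (tbl : PySem.Set String) : Bool :=
  match s with
  | [] => false
  | a :: rest => if PySem.Set.contains tbl a then true else pvLoopHitA rest tbl

def get_author_tier (authors : List String) : Option Int :=
  if authors = [] then none
  else
    let author_set := pvBuildAuthorSet authors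
    if pvLoopHitA author_set pvTier1 then some 1
    else if pvLoopHitA author_set pvTier5 then some 5
    else if pvLoopHitA author_set pvTier12 then some 2
    else if pvLoopHitA author_set pvTier2 then some 2
    else if pvLoopHitA author_set pvTier3 then some 3
    else none

-- ===== PORT B =====
-- B keeps its tier data as plain lists paired with the tier number, in priority order
def pvTierLists : List (List String × Int) :=
  [(["fehr", "list", "levitt", "gneezy", "rustichini", "charness",
     "duflo", "banerjee", "kremer", "miguel", "karlan",
     "chetty", "friedman", "saez", "kleven",
     "camerer", "loewenstein", "prelec", "weber"], 1),
   (["arrow", "debreu", "nash", "harsanyi", "selten",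
     "myerson", "maskin", "tirole", "laffont",
     "milgrom", "wilson", "roth", "shapley",
     "aumann", "schelling", "rubinstein",
     "stiglitz", "spence", "rothschild",
     "grossman", "hart", "holmstrom",
     "diamond", "dybvig", "mortensen", "pissarides",
     "lucas", "sargent", "prescott", "kydland",
     "becker", "murphy", "posner",
     "williamson", "coase", "north",
     "heckman", "mcfadden", "newey", "west",
     "polanyi", "kuhn", "collins", "ioannidis", "nosek",
     "gigerenzer", "todd", "hertwig", "hoffrage"], 5),
   (["thaler", "benartzi", "madrian", "choi",
     "ariely", "norton", "mazar",
     "kahneman", "tversky",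
     "falk", "gaechter", "kosfeld", "rockenbach",
     "malmendier", "tate", "shue",
     "dellavigna", "pope", "card",
     "imas", "exley", "niederle", "vesterlund",
     "autor", "katz", "krueger", "angrist", "pischke",
     "acemoglu", "robinson"], 2),
   (["shiller", "akerlof", "blanchard",
     "laibson", "odonoghue", "rabin",
     "sunstein", "jolls",
     "bertrand", "mullainathan"], 2),
   (["dweck", "duckworth", "baumeister", "vohs",
     "mischel", "bandura"], 3)]

-- for _rank, (_names, _tier) in enumerate(_TIERS): for _n in _names: _RANKED.setdefault(_n, (_rank, _tier))
def pvRanked : PySem.Dict String (Int × Int) :=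
  (PySem.List.enumerate pvTierLists).foldl
    (fun d rp => rp.2.1.foldl (fun d n => PySem.Dict.setdefault d n (rp.1, rp.2.2)) d)
    PySem.Dict.empty

-- inner loop body: if len(part) > 2: r = _RANKED.get(part); if r is not None and (best is None or r[0] < best[0]): best = r
def pvBestStep (best : Option (Int × Int)) (part : String) : Option (Int × Int) :=
  if PySem.Str.len part > 2 then
    match PySem.Dict.get? pvRanked part with
    | none => best
    | some r =>
        match best with
        | none => some r
        | some b => if r.1 < b.1 then some r else best
  else best

def get_author_tier_alt (authors : List String) : Option Int :=
  if authors = [] then none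
  else
    let best := authors.foldl (fun best author =>
      (PySem.Str.split₀ (PySem.Str.replace (PySem.Str.lower author) "," " ")).foldl
        pvBestStep best) none
    match best with
    | none => none
    | some b => some b.2

-- ===== PRECONDITION & SPEC =====
def Spec_get_author_tier (authors : List String) (out : Option Int) : Prop := out = get_author_tier_alt authors
instance (authors : List String) (out : Option Int) : Decidable (Spec_get_author_tier authors out) := by unfold Spec_get_author_tier; infer_instance

-- ===== CLAIM (what is proved, stated in full; the proofs are below) =====
def Claim_equal_get_author_tier : Prop := ∀ (authors : List String), Dom_get_author_tier authors → Spec_get_author_tier authors (get_author_tier authors)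

-- ===== LEMMAS AND PROOFS =====

-- B's tier data is A's five sets in priority order (same literals)
theorem pvTierLists_eq :
    pvTierLists = [((pvTier1 : List String), 1), (pvTier5, 5), (pvTier12, 2), (pvTier2, 2), (pvTier3, 3)] := rfl

-- the normalised parts of one author string, filtered to length > 2
def pvParts (author : String) : List String :=
  PySem.Str.split₀ (PySem.Str.replace (PySem.Str.lower author) "," " ")

def pvFlat (authors : List String) : List String :=
  authors.flatMap (fun a => (pvParts a).filter (fun p => decide (PySem.Str.len p > 2)))

-- get? through a setdefault loop over one name list with a constant value
theorem pvGet_setdefault_fold (l : List String) (v : Int × Int)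
    (d : PySem.Dict String (Int × Int)) (n : String) :
    PySem.Dict.get? (l.foldl (fun d m => PySem.Dict.setdefault d m v) d) n
      = (PySem.Dict.get? d n).orElse (fun _ => if l.contains n then some v else none) := by
  induction l generalizing d with
  | nil => cases hd : PySem.Dict.get? d n <;> simp [hd, Option.orElse]
  | cons m t ih =>
      simp only [List.foldl_cons, ih]
      by_cases h : n = m
      · subst h
        rw [PySem.Dict.get?_setdefault_self]
        cases hd : PySem.Dict.get? d n <;>
          simp [Option.orElse]
      · rw [PySem.Dict.get?_setdefault_of_ne d _ h]
        simp [h]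

-- the combined dict's lookup is the priority chain of membership tests
theorem pvGet_pvRanked (n : String) :
    PySem.Dict.get? pvRanked n =
      (if PySem.Set.contains pvTier1 n then some ((0 : Int), (1 : Int))
       else if PySem.Set.contains pvTier5 n then some (1, 5)
       else if PySem.Set.contains pvTier12 n then some (2, 2)
       else if PySem.Set.contains pvTier2 n then some (3, 2)
       else if PySem.Set.contains pvTier3 n then some (4, 3)
       else none) := by
  rw [show pvRanked
        = (PySem.List.enumerate pvTierLists).foldl
            (fun d rp => rp.2.1.foldl (fun d n => PySem.Dict.setdefault d n (rp.1, rp.2.2)) d)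
            PySem.Dict.empty from rfl,
      pvTierLists_eq]
  simp only [PySem.List.enumerate, List.foldl_cons, List.foldl_nil]
  rw [pvGet_setdefault_fold, pvGet_setdefault_fold, pvGet_setdefault_fold,
      pvGet_setdefault_fold, pvGet_setdefault_fold, PySem.Dict.get?_empty]
  simp only [PySem.Set.contains_eq_listContains]
  by_cases h1 : n ∈ (pvTier1 : List String) <;>
  by_cases h5 : n ∈ (pvTier5 : List String) <;>
  by_cases h12 : n ∈ (pvTier12 : List String) <;>
  by_cases h2 : n ∈ (pvTier2 : List String) <;>
  by_cases h3 : n ∈ (pvTier3 : List String) <;>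
    simp [h1, h5, h12, h2, h3, Option.orElse]

-- left-biased min-by-rank combine
def pvOptMin (b r : Option (Int × Int)) : Option (Int × Int) :=
  match r with
  | none => b
  | some p =>
      match b with
      | none => some p
      | some q => if p.1 < q.1 then some p else some q

theorem pvBestStep_eq (b : Option (Int × Int)) (p : String) :
    pvBestStep b p =
      if PySem.Str.len p > 2 then pvOptMin b (PySem.Dict.get? pvRanked p) else b := by
  unfold pvBestStep pvOptMin
  split_ifs
  · cases PySem.Dict.get? pvRanked p with
    | none => rfl
    | some r => cases b <;> simp
  · rfl

theorem pvOptMin_none_left (r : Option (Int × Int)) : pvOptMin none r = r := by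
  cases r <;> rfl

theorem pvOptMin_assoc (b r x : Option (Int × Int)) :
    pvOptMin (pvOptMin b r) x = pvOptMin b (pvOptMin r x) := by
  rcases b with _ | q <;> rcases r with _ | p <;> rcases x with _ | z <;>
    simp only [pvOptMin] <;> split_ifs <;>
    first
      | rfl
      | (exfalso; omega)
      | (simp only [pvOptMin]; split_ifs <;> first | rfl | (exfalso; omega))

-- the rank-lookup min step (the then-branch of pvBestStep)
def pvMinStep (b : Option (Int × Int)) (p : String) : Option (Int × Int) :=
  pvOptMin b (PySem.Dict.get? pvRanked p)

-- the filtered min step on a whole parts list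
theorem pvFoldl_bestStep_filter (l : List String) (b : Option (Int × Int)) :
    l.foldl pvBestStep b
      = (l.filter (fun p => decide (PySem.Str.len p > 2))).foldl pvMinStep b := by
  induction l generalizing b with
  | nil => simp
  | cons p t ih =>
      rw [List.foldl_cons, pvBestStep_eq, ih, List.filter_cons]
      by_cases h : PySem.Str.len p > 2
      · rw [if_pos h, if_pos (by simpa using h), List.foldl_cons]; rfl
      · rw [if_neg h, if_neg (by simpa using h)]

theorem pvFoldl_min_step (s : List String) (b : Option (Int × Int)) :
    s.foldl pvMinStep b = pvOptMin b (s.foldl pvMinStep none) := by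
  induction s generalizing b with
  | nil => rfl
  | cons a t ih =>
      simp only [List.foldl_cons]
      rw [ih (pvMinStep b a), ih (pvMinStep none a)]
      show pvOptMin (pvOptMin b _) _ = pvOptMin b (pvOptMin (pvOptMin none _) _)
      rw [pvOptMin_none_left, pvOptMin_assoc]

-- B's nested loop is the min fold over the flattened filtered parts
theorem pvAlt_eq_minFold (authors : List String) :
    authors.foldl (fun best author => (pvParts author).foldl pvBestStep best) none
      = (pvFlat authors).foldl pvMinStep none := by
  have key : ∀ (l : List String) (b : Option (Int × Int)),
      l.foldl (fun best author => (pvParts author).foldl pvBestStep best) b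
        = pvOptMin b ((pvFlat l).foldl pvMinStep none) := by
    intro l
    induction l with
    | nil => intro b; rfl
    | cons a t ih =>
        intro b
        simp only [List.foldl_cons, ih, pvFlat, List.flatMap_cons]
        rw [pvFoldl_bestStep_filter, pvFoldl_min_step, pvOptMin_assoc, List.foldl_append]
        congr 1
        conv_rhs => rw [pvFoldl_min_step]
  rw [key, pvOptMin_none_left]

-- the single min-rank pass over any name list equals A's priority chain of 'any' tests
set_option maxHeartbeats 2000000 in
theorem pvMain (s : List String) :
    s.foldl pvMinStep none =
      (if s.any (fun a => PySem.Set.contains pvTier1 a) then some ((0 : Int), (1 : Int))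
       else if s.any (fun a => PySem.Set.contains pvTier5 a) then some (1, 5)
       else if s.any (fun a => PySem.Set.contains pvTier12 a) then some (2, 2)
       else if s.any (fun a => PySem.Set.contains pvTier2 a) then some (3, 2)
       else if s.any (fun a => PySem.Set.contains pvTier3 a) then some (4, 3)
       else none) := by
  induction s with
  | nil => rfl
  | cons a t ih =>
      rw [List.foldl_cons, pvFoldl_min_step t (pvMinStep none a),
        show pvMinStep none a = PySem.Dict.get? pvRanked a from pvOptMin_none_left _,
        ih, pvGet_pvRanked a]
      simp only [List.any_cons]
      rcases Bool.eq_false_or_eq_true (PySem.Set.contains pvTier1 a) with h1 | h1 <;>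
      rcases Bool.eq_false_or_eq_true (PySem.Set.contains pvTier5 a) with h5 | h5 <;>
      rcases Bool.eq_false_or_eq_true (PySem.Set.contains pvTier12 a) with h12 | h12 <;>
      rcases Bool.eq_false_or_eq_true (PySem.Set.contains pvTier2 a) with h2 | h2 <;>
      rcases Bool.eq_false_or_eq_true (PySem.Set.contains pvTier3 a) with h3 | h3 <;>
        simp only [h1, h5, h12, h2, h3, Bool.true_or, Bool.false_or, reduceIte] <;>
        (try split_ifs) <;> (first | rfl | simp_all)

-- A's five loops are membership tests
theorem pvLoopHitA_eq_any (s : List String) (tbl : PySem.Set String) :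
    pvLoopHitA s tbl = s.any (fun a => PySem.Set.contains tbl a) := by
  induction s with
  | nil => rfl
  | cons a t ih => simp only [pvLoopHitA, List.any_cons, ← ih]; split_ifs <;> simp_all

-- A's author_set has the same members as the flat filtered parts list
theorem pvMem_buildSet (authors : List String) (x : String) :
    x ∈ pvBuildAuthorSet authors ↔ x ∈ pvFlat authors := by
  have inner : ∀ (l : List String) (s : PySem.Set String),
      l.foldl (fun s part => if PySem.Str.len part > 2 then PySem.Set.add s part else s) s
        = (l.filter (fun p => decide (PySem.Str.len p > 2))).foldl PySem.Set.add s := by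
    intro l
    induction l with
    | nil => intro s; rfl
    | cons p t ih =>
        intro s
        rw [List.foldl_cons, List.filter_cons]
        by_cases h : PySem.Str.len p > 2
        · rw [if_pos h, if_pos (by simpa using h), List.foldl_cons, ih]
        · rw [if_neg h, if_neg (by simpa using h), ih]
  have key : ∀ (l : List String) (s : PySem.Set String),
      (x ∈ l.foldl (fun s author =>
          (pvParts author).foldl
            (fun s part => if PySem.Str.len part > 2 then PySem.Set.add s part else s) s) s)
        ↔ x ∈ s ∨ x ∈ pvFlat l := by
    intro l
    induction l with
    | nil => intro s; simp [pvFlat]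
    | cons a t ih =>
        intro s
        simp only [List.foldl_cons, ih, pvFlat, List.flatMap_cons, List.mem_append]
        rw [inner]
        have : ∀ (m : List String) (s : PySem.Set String),
            x ∈ m.foldl PySem.Set.add s ↔ x ∈ s ∨ x ∈ m := by
          intro m
          induction m with
          | nil => intro s; simp
          | cons y r ihm =>
              intro s
              simp only [List.foldl_cons, ihm, PySem.Set.mem_add, List.mem_cons]
              constructor
              · rintro ((h | h) | h) <;> tauto
              · rintro (h | h | h) <;> tauto
        rw [this, or_assoc]
  exact (key authors PySem.Set.empty).trans (by simp [PySem.Set.empty])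
  
-- 'any' only depends on membership
theorem pvAny_congr (l l' : List String) (f : String → Bool)
    (h : ∀ x, x ∈ l ↔ x ∈ l') : l.any f = l'.any f := by
  rw [Bool.eq_iff_iff]
  simp only [List.any_eq_true]
  constructor
  · rintro ⟨x, hx, hf⟩; exact ⟨x, (h x).1 hx, hf⟩
  · rintro ⟨x, hx, hf⟩; exact ⟨x, (h x).2 hx, hf⟩

-- ===== VERDICT (by name: the statement is the Claim_ definition above) =====
theorem get_author_tier_spec : Claim_equal_get_author_tier := by
  unfold Claim_equal_get_author_tier Spec_get_author_tier
  intro authors _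
  unfold get_author_tier get_author_tier_alt
  by_cases he : authors = []
  · simp [he]
  · simp only [he, if_false]
    have hset : ∀ tbl, pvLoopHitA (pvBuildAuthorSet authors) tbl
        = (pvFlat authors).any (fun a => PySem.Set.contains tbl a) := by
      intro tbl
      rw [pvLoopHitA_eq_any]
      exact pvAny_congr _ _ _ (pvMem_buildSet authors)
    rw [show (authors.foldl (fun best author =>
          (PySem.Str.split₀ (PySem.Str.replace (PySem.Str.lower author) "," " ")).foldl
            pvBestStep best) none)
        = (pvFlat authors).foldl pvMinStep none from pvAlt_eq_minFold authors,
      pvMain (pvFlat authors), hset, hset, hset, hset, hset]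
    split_ifs <;> rfl
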